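-- pv_equiv track=rewrite | github.com/yashwalker7/GFG-POTD | GFG/.py | getDistinctDifference
-- ===== SOURCE A (Python) =====
-- from typing import List
--
-- def getDistinctDifference(N : int, A : List[int]) -> List[int]:
--
--     l, r = [0]*N, [0]*N
--     lc, rc = set(), set()
--     for i in range(N):
--         lc.add(A[i])
--         l[i] = len(lc)
--         rc.add(A[N-1-i])
--         r[N-1-i] = len(rc)
--
--     a = []
--     for i in range(N):
--         lc = 0 if i-1 < 0 else l[i-1]
--         rc = 0 if i+1 >= N else r[i+1]
--         a.append(lc-rc)
--     return a
-- ===== SOURCE B (Python) =====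
-- def getDistinctDifference(N, A):
--     # Instead of maintaining sets of seen values, index the array once by value:
--     # record each value's first and last occurrence index in two dicts.  Then
--     # distinct(A[0..i-1]) = number of first-occurrence positions < i and
--     # distinct(A[i+1..N-1]) = D - number of last-occurrence positions <= i,
--     # so one forward pass with two integer counters produces the answer.
--     first, last = {}, {}
--     for i in range(N):
--         v = A[i]
--         if v not in first:
--             first[v] = i
--         last[v] = i
--     D = len(last)
--     res = []
--     f = 0  # first occurrences among indices < i
--     l = 0  # last occurrences among indices <= i
--     for i in range(N):
--         if last[A[i]] == i:
--             l += 1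
--         res.append(f - (D - l))
--         if first[A[i]] == i:
--             f += 1
--     return res
-- ===== Notes on version B (the rewrite author's own statement) =====
-- stated objective: alternative
-- what changed: A maintains two growing sets and reads their sizes into prefix/suffix distinct-count arrays, then combines the arrays in a second loop; B never builds those arrays or reads set sizes: it indexes the array by value into first- and last-occurrence-position dicts and derives each answer in one forward pass from two integer counters of first/last occurrences crossed so far.
import Mathlib
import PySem

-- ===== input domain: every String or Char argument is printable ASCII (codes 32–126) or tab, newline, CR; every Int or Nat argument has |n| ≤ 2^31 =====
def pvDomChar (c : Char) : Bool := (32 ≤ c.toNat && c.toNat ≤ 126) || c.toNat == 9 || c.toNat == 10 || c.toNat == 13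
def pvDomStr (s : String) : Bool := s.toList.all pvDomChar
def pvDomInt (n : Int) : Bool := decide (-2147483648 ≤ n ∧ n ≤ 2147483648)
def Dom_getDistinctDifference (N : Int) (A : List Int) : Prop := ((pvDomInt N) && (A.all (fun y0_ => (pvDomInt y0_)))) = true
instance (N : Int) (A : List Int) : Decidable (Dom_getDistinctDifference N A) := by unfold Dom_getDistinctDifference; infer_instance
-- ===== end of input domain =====

-- B replaces A's two growing sets and prefix/suffix count arrays by first/last
-- occurrence-index dicts plus two integer counters in one forward pass (objective: alternative).

-- ===== PORT A =====
-- first loop of A: state (l, r, lc, rc); iteration k processes i = k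
def pvA_loop1 (N : Int) (A : List Int) : Nat → List Int × List Int × PySem.Set Int × PySem.Set Int
  | 0 => (List.replicate N.toNat 0, List.replicate N.toNat 0, PySem.Set.empty, PySem.Set.empty)
  | k+1 =>
    let (l, r, lc, rc) := pvA_loop1 N A k
    let i : Int := (k : Int)
    let lc' := PySem.Set.add lc (PySem.List.pyGetD A i 0)
    let l' := PySem.List.pySetD l i ((lc'.length : Int))
    let rc' := PySem.Set.add rc (PySem.List.pyGetD A (N - 1 - i) 0)
    let r' := PySem.List.pySetD r (N - 1 - i) ((rc'.length : Int))
    (l', r', lc', rc')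

def getDistinctDifference (N : Int) (A : List Int) : List Int :=
  let (l, r, _, _) := pvA_loop1 N A N.toNat
  (List.range N.toNat).foldl (fun (a : List Int) (k : Nat) =>
    let i : Int := (k : Int)
    let lcv : Int := if i - 1 < 0 then 0 else PySem.List.pyGetD l (i - 1) 0
    let rcv : Int := if i + 1 ≥ N then 0 else PySem.List.pyGetD r (i + 1) 0
    a ++ [lcv - rcv]) []

-- ===== PORT B =====
-- first loop of B: build the first- and last-occurrence-index dicts; step k processes i = k
def pvB_dicts (N : Int) (A : List Int) : Nat → PySem.Dict Int Int × PySem.Dict Int Int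
  | 0 => (PySem.Dict.empty, PySem.Dict.empty)
  | k+1 =>
    let (first, last) := pvB_dicts N A k
    let v := PySem.List.pyGetD A ((k : Nat) : Int) 0
    let first' := if first.contains v then first else first.insert v (k : Int)
    (first', last.insert v (k : Int))

-- second loop of B: state (f, l, res); the lookups last[A[i]] / first[A[i]] are ported with
-- getD (exact: on every admitted input the key was inserted by the first loop, no KeyError)
def pvB_loop (A : List Int) (first last : PySem.Dict Int Int) (D : Int) :
    Nat → Int × Int × List Int
  | 0 => (0, 0, [])
  | k+1 =>
    let (f, l, res) := pvB_loop A first last D k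
    let v := PySem.List.pyGetD A ((k : Nat) : Int) 0
    let l' := if last.getD v 0 = (k : Int) then l + 1 else l
    let res' := res ++ [f - (D - l')]
    let f' := if first.getD v 0 = (k : Int) then f + 1 else f
    (f', l', res')

def getDistinctDifference_alt (N : Int) (A : List Int) : List Int :=
  let (first, last) := pvB_dicts N A N.toNat
  let D : Int := ((PySem.Dict.size last : Nat) : Int)
  (pvB_loop A first last D N.toNat).2.2

-- ===== PRECONDITION & SPEC =====
-- Pre_ excludes exactly the inputs where A raises IndexError: A[i] with N > len(A).
def Pre_getDistinctDifference (N : Int) (A : List Int) : Prop := N ≤ (A.length : Int)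
instance (N : Int) (A : List Int) : Decidable (Pre_getDistinctDifference N A) := by unfold Pre_getDistinctDifference; infer_instance
def pvWitness_getDistinctDifference : Int × List Int := (3, [1, 2, 1])

def Spec_getDistinctDifference (N : Int) (A : List Int) (out : List Int) : Prop := out = getDistinctDifference_alt N A
instance (N : Int) (A : List Int) (out : List Int) : Decidable (Spec_getDistinctDifference N A out) := by unfold Spec_getDistinctDifference; infer_instance

-- ===== CLAIM (what is proved, stated in full; the proofs are below) =====
def Claim_equal_getDistinctDifference : Prop := ∀ (N : Int) (A : List Int), Dom_getDistinctDifference N A → Pre_getDistinctDifference N A → Spec_getDistinctDifference N A (getDistinctDifference N A)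

-- ===== LEMMAS AND PROOFS =====

-- the prefix set after k steps: distinct elements of A[0:k]
def pvPre (A : List Int) (k : Nat) : PySem.Set Int := PySem.Set.ofList (A.take k)
-- the suffix set after k backward additions over A[0:n]: A[n-1], …, A[n-k]
def pvSuf (A : List Int) (n : Nat) : Nat → PySem.Set Int
  | 0 => PySem.Set.empty
  | k+1 => PySem.Set.add (pvSuf A n k) (A.getD (n - 1 - k) 0)

def pvDL (A : List Int) (k : Nat) : Int := ((pvPre A k).length : Int)
def pvDS (A : List Int) (n k : Nat) : Int := ((pvSuf A n k).length : Int)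

-- the common value both programs compute
def pvTarget (A : List Int) (n : Nat) : List Int :=
  (List.range n).map (fun k => pvDL A k - (if k+1 < n then pvDS A n (n-(k+1)) else 0))

-- spec values of the two dicts: first / last index of v among A[0:k]
def pvFirst? (A : List Int) : Nat → Int → Option Int
  | 0, _ => none
  | k+1, v => match pvFirst? A k v with
      | some j => some j
      | none => if A.getD k 0 = v then some (k : Int) else none

def pvLast? (A : List Int) : Nat → Int → Option Int
  | 0, _ => none
  | k+1, v => if A.getD k 0 = v then some (k : Int) else pvLast? A k v

theorem pvFirst?_succ (A : List Int) (k : Nat) (v : Int) :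
    pvFirst? A (k+1) v = (match pvFirst? A k v with
      | some j => some j
      | none => if A.getD k 0 = v then some (k : Int) else none) := rfl

theorem pvLast?_succ (A : List Int) (k : Nat) (v : Int) :
    pvLast? A (k+1) v = (if A.getD k 0 = v then some (k : Int) else pvLast? A k v) := rfl

theorem pvFirst?_succ_eq (A : List Int) (k : Nat) (v : Int)
    (h : v ≠ A.getD k 0 ∨ (pvFirst? A k v).isSome = true) :
    pvFirst? A (k+1) v = pvFirst? A k v := by
  rw [pvFirst?_succ]
  cases hm : pvFirst? A k v with
  | some j => rfl
  | none =>
      rcases h with h | h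
      · simp only
        rw [if_neg (fun hh => h hh.symm)]
      · rw [hm] at h; simp at h

theorem pvFirst?_succ_self_none (A : List Int) (k : Nat)
    (h : pvFirst? A k (A.getD k 0) = none) :
    pvFirst? A (k+1) (A.getD k 0) = some (k : Int) := by
  rw [pvFirst?_succ, h]
  simp

theorem pv_replicate_eq_map_range {α : Type} (n : Nat) (v : α) :
    List.replicate n v = (List.range n).map (fun _ => v) := by
  apply List.ext_getElem <;> simp

theorem pv_map_range_set {α : Type} (f : Nat → α) (n k : Nat) (v : α) (h : k < n) :
    ((List.range n).map f).set k v = (List.range n).map (fun i => if i = k then v else f i) := by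
  apply List.ext_getElem
  · simp
  · intro i hi hi'
    simp only [List.getElem_set, List.getElem_map, List.getElem_range]
    rcases eq_or_ne i k with hik | hik
    · subst hik; simp
    · rw [if_neg (Ne.symm hik), if_neg hik]

theorem pvPre_succ (A : List Int) (k : Nat) (h : k < A.length) :
    pvPre A (k+1) = PySem.Set.add (pvPre A k) (A.getD k 0) := by
  unfold pvPre
  rw [List.take_succ, ← PySem.Set.ofList_append_singleton]
  congr 1
  simp [List.getElem?_eq_getElem h, List.getD]

theorem pv_idx_eq (N : Int) (n k : Nat) (hN : N = (n : Int)) (hk : k < n) :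
    N - 1 - (k : Int) = ((n - 1 - k : Nat) : Int) := by
  subst hN; omega

theorem pvA_loop1_char (N : Int) (A : List Int) (n : Nat) (hN : N = (n : Int))
    (hlen : n ≤ A.length) (k : Nat) (hk : k ≤ n) :
    pvA_loop1 N A k =
      ((List.range n).map (fun i => if i < k then pvDL A (i+1) else 0),
       (List.range n).map (fun i => if n - k ≤ i then pvDS A n (n - i) else 0),
       pvPre A k, pvSuf A n k) := by
  induction k with
  | zero =>
      have h1 : N.toNat = n := by omega
      simp only [pvA_loop1, h1, Prod.mk.injEq]
      refine ⟨?_, ?_, by trivial, by trivial⟩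
      · rw [pv_replicate_eq_map_range]
        apply List.map_congr_left; intro i hi; simp
      · rw [pv_replicate_eq_map_range]
        apply List.map_congr_left; intro i hi
        simp only [List.mem_range] at hi
        rw [if_neg (by omega)]
  | succ k ih =>
      have hk' : k < n := by omega
      simp only [pvA_loop1]
      rw [ih (by omega)]
      have hA : PySem.List.pyGetD A ((k : Nat) : Int) 0 = A.getD k 0 :=
        PySem.List.pyGetD_natCast A k 0
      have hA2 : PySem.List.pyGetD A (N - 1 - (k : Int)) 0 = A.getD (n - 1 - k) 0 := by
        rw [pv_idx_eq N n k hN hk']; exact PySem.List.pyGetD_natCast A (n-1-k) 0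
      dsimp only
      rw [hA, hA2, ← pvPre_succ A k (by omega)]
      simp only [Prod.mk.injEq]
      refine ⟨?_, ?_, by trivial, by trivial⟩
      · -- l component
        rw [PySem.List.pySetD_natCast,
            pv_map_range_set _ n k _ hk']
        apply List.map_congr_left; intro i hi
        simp only [List.mem_range] at hi
        rcases eq_or_ne i k with h1 | h1
        · subst h1; simp [pvDL]
        · rw [if_neg h1]
          by_cases h2 : i < k
          · rw [if_pos h2, if_pos (by omega)]
          · rw [if_neg h2, if_neg (by omega)]
      · -- r component
        rw [show PySem.Set.add (pvSuf A n k) (A.getD (n-1-k) 0) = pvSuf A n (k+1) from rfl,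
            pv_idx_eq N n k hN hk', PySem.List.pySetD_natCast,
            pv_map_range_set _ n (n-1-k) _ (by omega)]
        apply List.map_congr_left; intro i hi
        simp only [List.mem_range] at hi
        rcases eq_or_ne i (n-1-k) with h1 | h1
        · subst h1
          rw [if_pos rfl, if_pos (by omega), show n - (n-1-k) = k+1 by omega]
          rfl
        · rw [if_neg h1]
          by_cases h2 : n - k ≤ i
          · rw [if_pos h2, if_pos (by omega)]
          · rw [if_neg h2, if_neg (by omega)]

theorem pvA_eq_target (N : Int) (A : List Int) (n : Nat) (hN : N = (n : Int))
    (hlen : n ≤ A.length) : getDistinctDifference N A = pvTarget A n := by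
  unfold getDistinctDifference
  have hn : N.toNat = n := by omega
  rw [hn, pvA_loop1_char N A n hN hlen n le_rfl]
  dsimp only
  rw [PySem.List.foldl_append_singleton_eq_map]
  rw [List.nil_append]
  unfold pvTarget
  apply List.map_congr_left; intro k hk
  simp only [List.mem_range] at hk
  congr 1
  · -- prefix read
    by_cases h0 : k = 0
    · subst h0
      rw [if_pos (by norm_num)]
      rfl
    · rw [if_neg (by omega),
          show (k : Int) - 1 = ((k - 1 : Nat) : Int) by omega,
          PySem.List.pyGetD_natCast,
          PySem.List.getD_map_range _ n (k-1) 0 (by omega),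
          if_pos (by omega), show k - 1 + 1 = k by omega]
  · -- suffix read
    by_cases h2 : k + 1 < n
    · rw [if_neg (by omega), if_pos h2,
          show (k : Int) + 1 = ((k + 1 : Nat) : Int) by omega,
          PySem.List.pyGetD_natCast,
          PySem.List.getD_map_range _ n (k+1) 0 (by omega),
          if_pos (by omega)]
    · rw [if_pos (by omega), if_neg h2]

-- ---- B-side: spec facts about pvFirst?/pvLast? ----

theorem pvFirst?_lt (A : List Int) (k : Nat) (v : Int) (j : Int)
    (h : pvFirst? A k v = some j) : j < (k : Int) ∧ 0 ≤ j := by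
  induction k with
  | zero => simp [pvFirst?] at h
  | succ k ih =>
      unfold pvFirst? at h
      cases hm : pvFirst? A k v with
      | some j' =>
          simp only [hm, Option.some.injEq] at h
          subst h
          have := ih hm
          omega
      | none =>
          simp only [hm] at h
          split_ifs at h with hc
          · simp only [Option.some.injEq] at h; omega

theorem pvFirst?_isSome (A : List Int) (k : Nat) (v : Int) (hk : k ≤ A.length) :
    (pvFirst? A k v).isSome = true ↔ v ∈ A.take k := by
  induction k with
  | zero => simp [pvFirst?]
  | succ k ih =>
      have hlt : k < A.length := by omega
      have hgd : A.getD k 0 = A[k] := by simp [List.getD, List.getElem?_eq_getElem hlt]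
      rw [List.take_succ, List.getElem?_eq_getElem hlt]
      unfold pvFirst?
      cases hm : pvFirst? A k v with
      | some j =>
          simp only [Option.isSome_some, true_iff]
          have := (ih (by omega)).mp (by rw [hm]; rfl)
          exact List.mem_append.mpr (Or.inl this)
      | none =>
          have hnot : v ∉ A.take k := by
            intro hv
            have := (ih (by omega)).mpr hv
            rw [hm] at this; cases this
          simp only [hgd, List.mem_append, List.mem_singleton, Option.toList_some]
          split_ifs with hc
          · simp only [Option.isSome_some, true_iff]
            exact Or.inr (by simp [← hc])
          · simp only [Option.isSome_none, Bool.false_eq_true, false_iff]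
            push_neg
            refine ⟨hnot, by simpa using fun h => hc h.symm⟩

theorem pvLast?_isSome (A : List Int) (k : Nat) (v : Int) (hk : k ≤ A.length) :
    (pvLast? A k v).isSome = true ↔ v ∈ A.take k := by
  induction k with
  | zero => simp [pvLast?]
  | succ k ih =>
      have hlt : k < A.length := by omega
      have hgd : A.getD k 0 = A[k] := by simp [List.getD, List.getElem?_eq_getElem hlt]
      rw [List.take_succ, List.getElem?_eq_getElem hlt]
      unfold pvLast?
      simp only [hgd, List.mem_append, List.mem_singleton, Option.toList_some]
      split_ifs with hc
      · simp only [Option.isSome_some, true_iff]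
        exact Or.inr (by simp [← hc])
      · rw [ih (by omega)]
        constructor
        · exact fun h => Or.inl h
        · rintro (h | h)
          · exact h
          · exact absurd h.symm (by simpa using hc)

-- the first-occurrence test: first[A[i]] == i  ↔  A[i] does not occur earlier
theorem pvFirst?_query (A : List Int) (n i : Nat) (hi : i < n) (hn : n ≤ A.length) :
    pvFirst? A n (A.getD i 0) = some (i : Int) ↔ A.getD i 0 ∉ A.take i := by
  induction n with
  | zero => omega
  | succ n ih =>
      have hgd : ∀ (m : Nat) (hm : m < A.length), A.getD m 0 = A[m] := fun m hm => by
        simp [List.getD, List.getElem?_eq_getElem hm]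
      rcases Nat.lt_or_ge i n with hin | hin
      · -- i < n: the step does not change the answer for A[i]
        rw [← ih hin (by omega)]
        have hmem : A.getD i 0 ∈ A.take n := by
          rw [hgd i (by omega)]
          exact List.mem_take_iff_getElem.mpr ⟨i, by omega, by simp⟩
        have hs := (pvFirst?_isSome A n (A.getD i 0) (by omega)).mpr hmem
        cases hm : pvFirst? A n (A.getD i 0) with
        | some j => unfold pvFirst?; rw [hm]
        | none => rw [hm] at hs; cases hs
      · -- i = n
        have hieq : i = n := by omega
        subst hieq
        unfold pvFirst?
        cases hm : pvFirst? A i (A.getD i 0) with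
        | some j =>
            have hj := pvFirst?_lt A i (A.getD i 0) j hm
            have hmem := (pvFirst?_isSome A i (A.getD i 0) (by omega)).mp (by rw [hm]; rfl)
            simp only [Option.some.injEq]
            constructor
            · intro h; exact absurd h (by omega)
            · intro h; exact absurd hmem h
        | none =>
            have hnot : A.getD i 0 ∉ A.take i := by
              intro hv
              have := (pvFirst?_isSome A i (A.getD i 0) (by omega)).mpr hv
              rw [hm] at this; cases this
            dsimp only
            rw [if_pos rfl]
            exact iff_of_true rfl hnot

-- the last-occurrence test: last[A[i]] == i  ↔  A[i] does not occur later in A[0:n]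
theorem pvLast?_query (A : List Int) (n i : Nat) (hi : i < n) (hn : n ≤ A.length) :
    pvLast? A n (A.getD i 0) = some (i : Int) ↔ A.getD i 0 ∉ (A.take n).drop (i+1) := by
  induction n with
  | zero => omega
  | succ n ih =>
      have hlt : n < A.length := by omega
      have hgd : A.getD n 0 = A[n] := by simp [List.getD, List.getElem?_eq_getElem hlt]
      rcases Nat.lt_or_ge i n with hin | hin
      · have hdec : (A.take (n+1)).drop (i+1) = (A.take n).drop (i+1) ++ [A[n]] := by
          rw [List.take_succ, List.getElem?_eq_getElem hlt]
          rw [List.drop_append_of_le_length (by simp; omega)]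
          simp
        rw [hdec]
        unfold pvLast?
        by_cases hc : A.getD n 0 = A.getD i 0
        · rw [if_pos hc]
          simp only [List.mem_append, List.mem_singleton, Option.some.injEq]
          constructor
          · intro h; exact absurd h (by omega)
          · intro h
            exact absurd (Or.inr (by rw [← hgd, hc])) h
        · rw [if_neg hc, ih hin (by omega)]
          simp only [List.mem_append, List.mem_singleton]
          constructor
          · intro h hmem
            rcases hmem with h1 | h1
            · exact h h1
            · exact hc (by rw [hgd, h1])
          · intro h h1; exact h (Or.inl h1)
      · have hieq : i = n := by omega
        subst hieq
        unfold pvLast?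
        rw [if_pos rfl]
        refine iff_of_true rfl ?_
        rw [List.drop_eq_nil_of_le (by simp)]
        simp

-- characterization of B's two dicts
theorem pvB_dicts_char (N : Int) (A : List Int) (n : Nat) (_hN : N = (n : Int))
    (hlen : n ≤ A.length) (k : Nat) (hk : k ≤ n) :
    (∀ v, (pvB_dicts N A k).1.get? v = pvFirst? A k v) ∧
    (∀ v, (pvB_dicts N A k).2.get? v = pvLast? A k v) ∧
    (pvB_dicts N A k).2.keys = pvPre A k := by
  induction k with
  | zero =>
      refine ⟨fun v => ?_, fun v => ?_, ?_⟩ <;>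
        simp [pvB_dicts, pvFirst?, pvLast?, pvPre, PySem.Dict.get?_empty,
              PySem.Dict.keys_empty, PySem.Set.ofList]
  | succ k ih =>
      obtain ⟨ihF, ihL, ihK⟩ := ih (by omega)
      have hkl : k < A.length := by omega
      have hA : PySem.List.pyGetD A ((k : Nat) : Int) 0 = A.getD k 0 :=
        PySem.List.pyGetD_natCast A k 0
      have hF : (pvB_dicts N A (k+1)).1 =
          (if (pvB_dicts N A k).1.contains (A.getD k 0) then (pvB_dicts N A k).1
           else (pvB_dicts N A k).1.insert (A.getD k 0) (k : Int)) := by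
        simp only [pvB_dicts, hA]
      have hL : (pvB_dicts N A (k+1)).2 = (pvB_dicts N A k).2.insert (A.getD k 0) (k : Int) := by
        simp only [pvB_dicts, hA]
      refine ⟨fun v => ?_, fun v => ?_, ?_⟩
      · rw [hF]
        by_cases hc : (pvB_dicts N A k).1.contains (A.getD k 0) = true
        · rw [if_pos hc, ihF]
          rw [PySem.Dict.contains_eq_isSome_get?, ihF] at hc
          by_cases hv : v = A.getD k 0
          · subst hv
            exact (pvFirst?_succ_eq A k _ (Or.inr hc)).symm
          · exact (pvFirst?_succ_eq A k v (Or.inl hv)).symm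
        · rw [if_neg hc, PySem.Dict.get?_insert, ihF]
          rw [PySem.Dict.contains_eq_isSome_get?, ihF] at hc
          have hnone : pvFirst? A k (A.getD k 0) = none := by
            cases hm : pvFirst? A k (A.getD k 0) with
            | none => rfl
            | some j => rw [hm] at hc; simp at hc
          by_cases hv : v = A.getD k 0
          · rw [if_pos hv, hv, pvFirst?_succ_self_none A k hnone]
          · rw [if_neg hv, pvFirst?_succ_eq A k v (Or.inl hv)]
      · rw [hL, PySem.Dict.get?_insert, ihL, pvLast?_succ]
        by_cases hv : v = A.getD k 0
        · rw [if_pos hv, if_pos hv.symm]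
        · rw [if_neg hv, if_neg (fun h => hv h.symm)]
      · rw [hL]
        have hmem : (pvB_dicts N A k).2.contains (A.getD k 0) =
            (pvPre A k).contains (A.getD k 0) := by
          rw [PySem.Dict.contains_eq_isSome_get?, ihL]
          by_cases hv : A.getD k 0 ∈ A.take k
          · have h1 := (pvLast?_isSome A k (A.getD k 0) (by omega)).mpr hv
            have h2 : (pvPre A k).contains (A.getD k 0) = true := by
              simp only [pvPre, PySem.Set.contains, List.contains_eq_mem, decide_eq_true_eq]
              exact (PySem.Set.mem_ofList _ _).mpr hv
            rw [h1, h2]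
          · have h1 : (pvLast? A k (A.getD k 0)).isSome = false := by
              cases hm : pvLast? A k (A.getD k 0) with
              | none => rfl
              | some j =>
                  exact absurd ((pvLast?_isSome A k _ (by omega)).mp (by rw [hm]; rfl)) hv
            have h2 : (pvPre A k).contains (A.getD k 0) = false := by
              simp only [pvPre, PySem.Set.contains, List.contains_eq_mem, decide_eq_false_iff_not]
              exact fun h => hv ((PySem.Set.mem_ofList _ _).mp h)
            rw [h1, h2]
        rw [pvPre_succ A k hkl]
        unfold PySem.Set.add
        by_cases hc : (pvPre A k).contains (A.getD k 0) = true
        · rw [if_pos hc, PySem.Dict.keys_insert_of_contains _ _ (hmem.trans hc), ihK]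
        · rw [if_neg hc,
              PySem.Dict.keys_insert_of_not_contains _ _
                (by rw [hmem]; exact Bool.not_eq_true _ ▸ (by simpa using hc)),
              ihK]

-- sizes: the suffix set over all of A[0:n] has the same length as the prefix set
theorem pv_mem_pvSuf (A : List Int) (n : Nat) (hn : n ≤ A.length) (k : Nat) (hk : k ≤ n)
    (x : Int) : x ∈ pvSuf A n k ↔ x ∈ (A.take n).drop (n - k) := by
  induction k with
  | zero =>
      have h0 : (A.take n).drop (n - 0) = [] :=
        List.drop_eq_nil_of_le (by rw [List.length_take]; omega)
      rw [h0]
      simp [pvSuf, PySem.Set.empty]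
  | succ k ih =>
      have hlt : n - 1 - k < A.length := by omega
      have hgd : A.getD (n-1-k) 0 = A[n-1-k] := by
        simp [List.getD, List.getElem?_eq_getElem hlt]
      have hdec : (A.take n).drop (n - (k+1)) = A[n-1-k] :: (A.take n).drop (n - k) := by
        have h1 : n - (k+1) < (A.take n).length := by simp; omega
        rw [List.drop_eq_getElem_cons h1, show n - (k+1) + 1 = n - k by omega]
        congr 1
        rw [List.getElem_take]
        congr 1
        omega
      unfold pvSuf
      rw [PySem.Set.mem_add, ih (by omega), hdec, hgd, List.mem_cons]
      tauto

theorem pv_nodup_pvSuf (A : List Int) (n k : Nat) : (pvSuf A n k : List Int).Nodup := by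
  induction k with
  | zero => simp [pvSuf, PySem.Set.empty]
  | succ k ih =>
      unfold pvSuf PySem.Set.add
      split_ifs with hc
      · exact ih
      · rw [List.nodup_append]
        refine ⟨ih, List.nodup_singleton _, ?_⟩
        intro a ha b hb
        simp only [List.mem_singleton] at hb
        subst hb
        intro heq
        subst heq
        exact absurd ha (by simpa [List.contains_eq_mem] using hc)

theorem pvDS_full (A : List Int) (n : Nat) (hn : n ≤ A.length) :
    pvDS A n n = pvDL A n := by
  unfold pvDS pvDL
  congr 1
  have hperm : (pvSuf A n n : List Int).Perm (pvPre A n) := by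
    unfold pvPre
    rw [List.perm_ext_iff_of_nodup (pv_nodup_pvSuf A n n) (PySem.Set.nodup_ofList _)]
    intro a
    rw [pv_mem_pvSuf A n hn n le_rfl, PySem.Set.mem_ofList]
    simp
  exact hperm.length_eq

-- length increments of the two set-size sequences
theorem pv_set_add_length {s : PySem.Set Int} {x : Int} :
    (PySem.Set.add s x : List Int).length = s.length + (if x ∈ (s : List Int) then 0 else 1) := by
  unfold PySem.Set.add
  by_cases hc : s.contains x = true
  · rw [if_pos hc, if_pos (by simpa [List.contains_eq_mem] using hc)]
    simp
  · rw [if_neg hc, if_neg (by simpa [List.contains_eq_mem] using hc)]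
    simp

theorem pvDL_succ (A : List Int) (k : Nat) (hk : k < A.length) :
    pvDL A (k+1) = pvDL A k + (if A.getD k 0 ∈ A.take k then 0 else 1) := by
  unfold pvDL
  rw [pvPre_succ A k hk]
  rw [pv_set_add_length]
  push_cast
  congr 1
  by_cases h : A.getD k 0 ∈ A.take k
  · rw [if_pos h, if_pos (show A.getD k 0 ∈ (pvPre A k : List Int) from
      (PySem.Set.mem_ofList _ _).mpr h)]
  · rw [if_neg h, if_neg (show A.getD k 0 ∉ (pvPre A k : List Int) from
      fun hm => h ((PySem.Set.mem_ofList _ _).mp hm))]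

theorem pvDS_succ (A : List Int) (n : Nat) (hn : n ≤ A.length) (k : Nat) (hk : k < n) :
    pvDS A n (k+1) = pvDS A n k +
      (if A.getD (n-1-k) 0 ∈ (A.take n).drop (n-k) then 0 else 1) := by
  unfold pvDS
  show (((PySem.Set.add (pvSuf A n k) (A.getD (n-1-k) 0) : List Int).length : Int)) = _
  rw [pv_set_add_length]
  push_cast
  congr 1
  by_cases h : A.getD (n-1-k) 0 ∈ (A.take n).drop (n-k)
  · rw [if_pos h, if_pos ((pv_mem_pvSuf A n hn k (by omega) _).mpr h)]
  · rw [if_neg h, if_neg (fun hm => h ((pv_mem_pvSuf A n hn k (by omega) _).mp hm))]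

-- the forward loop of B
theorem pvB_loop_char (A : List Int) (n : Nat) (hn : n ≤ A.length)
    (F L : PySem.Dict Int Int) (D : Int)
    (hF : ∀ v, F.get? v = pvFirst? A n v) (hL : ∀ v, L.get? v = pvLast? A n v)
    (hD : D = pvDL A n) (m : Nat) (hm : m ≤ n) :
    pvB_loop A F L D m =
      (pvDL A m, pvDL A n - pvDS A n (n - m),
       (List.range m).map (fun i => pvDL A i - pvDS A n (n-(i+1)))) := by
  induction m with
  | zero =>
      simp only [pvB_loop, List.range_zero, List.map_nil, Nat.sub_zero,
                 pvDS_full A n hn]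
      refine Prod.ext ?_ (Prod.ext ?_ rfl) <;> simp [pvDL, pvPre, PySem.Set.ofList]
  | succ m ih =>
      have hmn : m < n := by omega
      have hml : m < A.length := by omega
      have hA : PySem.List.pyGetD A ((m : Nat) : Int) 0 = A.getD m 0 :=
        PySem.List.pyGetD_natCast A m 0
      have hmemn : A.getD m 0 ∈ A.take n := by
        have hgd : A.getD m 0 = A[m] := by simp [List.getD, List.getElem?_eq_getElem hml]
        rw [hgd]
        exact List.mem_take_iff_getElem.mpr ⟨m, by omega, by simp⟩
      -- the last-occurrence test
      have hLs : (L.getD (A.getD m 0) 0 = (m : Int)) ↔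
          A.getD m 0 ∉ (A.take n).drop (m+1) := by
        rw [PySem.Dict.getD_eq_get?_getD, hL]
        obtain ⟨j, hj⟩ := Option.isSome_iff_exists.mp
          ((pvLast?_isSome A n _ hn).mpr hmemn)
        rw [hj]
        simp only [Option.getD_some]
        rw [← pvLast?_query A n m hmn hn, hj]
        simp
      -- the first-occurrence test
      have hFs : (F.getD (A.getD m 0) 0 = (m : Int)) ↔
          A.getD m 0 ∉ A.take m := by
        rw [PySem.Dict.getD_eq_get?_getD, hF]
        obtain ⟨j, hj⟩ := Option.isSome_iff_exists.mp
          ((pvFirst?_isSome A n _ hn).mpr hmemn)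
        rw [hj]
        simp only [Option.getD_some]
        rw [← pvFirst?_query A n m hmn hn, hj]
        simp
      -- the suffix distinct count decrement
      have hDS : pvDS A n (n - m) = pvDS A n (n - (m+1)) +
          (if A.getD m 0 ∈ (A.take n).drop (m+1) then 0 else 1) := by
        have h1 := pvDS_succ A n hn (n - (m+1)) (by omega)
        rw [show n - (m+1) + 1 = n - m by omega] at h1
        rw [show n - 1 - (n - (m+1)) = m by omega] at h1
        rw [show n - (n - (m+1)) = m + 1 by omega] at h1
        exact h1
      have hDLs := pvDL_succ A m hml
      simp only [pvB_loop, ih (by omega), hA]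
      rw [List.range_succ, List.map_append]
      refine Prod.ext ?_ (Prod.ext ?_ ?_)
      · -- f component
        dsimp only
        by_cases hc : A.getD m 0 ∈ A.take m
        · rw [if_neg (by rw [hFs]; exact fun h => h hc), hDLs, if_pos hc]; ring
        · rw [if_pos (hFs.mpr hc), hDLs, if_neg hc]
      · -- l component
        dsimp only
        by_cases hc : A.getD m 0 ∈ (A.take n).drop (m+1)
        · rw [if_neg (by rw [hLs]; exact fun h => h hc)]
          rw [hDS, if_pos hc]
          ring
        · rw [if_pos (hLs.mpr hc), hDS, if_neg hc]
          ring
      · -- res component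
        dsimp only
        congr 1
        simp only [List.map_singleton, List.cons.injEq, and_true]
        by_cases hc : A.getD m 0 ∈ (A.take n).drop (m+1)
        · rw [if_neg (by rw [hLs]; exact fun h => h hc)]
          rw [hDS, if_pos hc, hD]
          ring
        · rw [if_pos (hLs.mpr hc), hDS, if_neg hc, hD]
          ring

theorem pvB_eq_target (N : Int) (A : List Int) (n : Nat) (hN : N = (n : Int))
    (hlen : n ≤ A.length) : getDistinctDifference_alt N A = pvTarget A n := by
  unfold getDistinctDifference_alt
  have hn : N.toNat = n := by omega
  obtain ⟨hF, hL, hK⟩ := pvB_dicts_char N A n hN hlen n le_rfl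
  have hD : (((pvB_dicts N A n).2.size : Nat) : Int) = pvDL A n := by
    have h1 : (pvB_dicts N A n).2.size = (pvB_dicts N A n).2.keys.length := by
      simp [PySem.Dict.size, PySem.Dict.keys]
    rw [h1, hK]
    rfl
  rw [hn]
  have := pvB_loop_char A n hlen (pvB_dicts N A n).1 (pvB_dicts N A n).2
    (((pvB_dicts N A n).2.size : Nat) : Int) hF hL hD n le_rfl
  dsimp only at this ⊢
  rw [this]
  unfold pvTarget
  apply List.map_congr_left
  intro k hk
  simp only [List.mem_range] at hk
  by_cases h2 : k + 1 < n
  · rw [if_pos h2]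
  · rw [if_neg h2, show n - (k+1) = 0 by omega]
    rfl

-- ===== VERDICT (by name: the statement is the Claim_ definition above) =====
theorem getDistinctDifference_spec : Claim_equal_getDistinctDifference := by
  intro N A _ hPre
  unfold Spec_getDistinctDifference
  by_cases h0 : 0 ≤ N
  · have hN : N = (N.toNat : Int) := (Int.toNat_of_nonneg h0).symm
    have hlen : N.toNat ≤ A.length := by
      unfold Pre_getDistinctDifference at hPre; omega
    rw [pvA_eq_target N A N.toNat hN hlen, pvB_eq_target N A N.toNat hN hlen]
  · have hn : N.toNat = 0 := by omega
    simp [getDistinctDifference, getDistinctDifference_alt, hn, pvA_loop1,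
          pvB_dicts, pvB_loop]
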